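-- pv_equiv track=rewrite | github.com/daoluzixin/tianchi-freight-agent | demo/calc_monthly_income.py | _iter_day_segments
-- ===== SOURCE A (Python) =====
-- def _iter_day_segments(start_min: int, end_min: int) -> list[tuple[int, int]]:
--     out: list[tuple[int, int]] = []
--     if end_min <= start_min:
--         return out
--     cur = start_min
--     while cur < end_min:
--         day_idx = cur // 1440
--         day_end = (day_idx + 1) * 1440
--         seg_end = min(day_end, end_min)
--         out.append((day_idx, seg_end - cur))
--         cur = seg_end
--     return out
-- ===== SOURCE B (Python) =====
-- def _iter_day_segments(start_min: int, end_min: int) -> list[tuple[int, int]]: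
--     if end_min <= start_min:
--         return []
--     first = start_min // 1440
--     last = (end_min - 1) // 1440
--     if first == last:
--         return [(first, end_min - start_min)]
--     out = [(first, (first + 1) * 1440 - start_min)]
--     out.extend((d, 1440) for d in range(first + 1, last))
--     out.append((last, end_min - last * 1440))
--     return out
-- ===== Notes on version B (the rewrite author's own statement) =====
-- stated objective: alternative
-- what changed: Replaces the uniform cursor walk (one floor-division per emitted day) with an explicit first/middle/last decomposition: the day indices are computed once up front and the full middle days are emitted directly as (d, 1440) over a range.
import Mathlib
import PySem

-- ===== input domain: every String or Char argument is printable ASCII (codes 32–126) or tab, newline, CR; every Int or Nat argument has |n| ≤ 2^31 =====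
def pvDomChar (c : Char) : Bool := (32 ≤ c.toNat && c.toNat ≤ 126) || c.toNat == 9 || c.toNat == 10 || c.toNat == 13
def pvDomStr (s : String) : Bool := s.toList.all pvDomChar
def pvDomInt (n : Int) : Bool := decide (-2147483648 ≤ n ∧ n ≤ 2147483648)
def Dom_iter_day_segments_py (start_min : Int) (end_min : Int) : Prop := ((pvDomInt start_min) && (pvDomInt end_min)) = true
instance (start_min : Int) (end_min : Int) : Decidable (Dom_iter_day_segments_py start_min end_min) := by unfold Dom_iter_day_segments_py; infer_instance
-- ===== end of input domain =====

-- B replaces A's uniform cursor walk with an explicit first/middle/last day decomposition (alternative decomposition, same cost).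


-- ===== PORT A =====
-- A's while loop: cursor cur walks forward one day-chunk per iteration, accumulating `out`.
def iterDaySegLoopA (cur end_min : Int) (out : List (Int × Int)) : List (Int × Int) :=
  if _h : cur < end_min then
    let day_idx := PySem.Int.floordiv cur 1440
    let day_end := (day_idx + 1) * 1440
    let seg_end := min day_end end_min
    iterDaySegLoopA seg_end end_min (out ++ [(day_idx, seg_end - cur)])
  else out
termination_by (end_min - cur).toNat
decreasing_by
  have h1 : PySem.Int.floordiv cur 1440 = cur / 1440 :=
    PySem.Int.floordiv_eq_ediv_of_pos (by norm_num)
  simp only [h1]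
  omega

def iter_day_segments_py (start_min : Int) (end_min : Int) : List (Int × Int) :=
  if end_min ≤ start_min then []
  else iterDaySegLoopA start_min end_min []

-- ===== PORT B =====
def iter_day_segments_py_alt (start_min : Int) (end_min : Int) : List (Int × Int) :=
  if end_min ≤ start_min then []
  else
    let first := PySem.Int.floordiv start_min 1440
    let last := PySem.Int.floordiv (end_min - 1) 1440
    if first = last then [(first, end_min - start_min)]
    else
      ((first, (first + 1) * 1440 - start_min) ::
        (PySem.List.pyRange (first + 1) last 1).map (fun d => (d, (1440 : Int))))
      ++ [(last, end_min - last * 1440)]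

-- ===== PRECONDITION & SPEC =====
def Spec_iter_day_segments_py (start_min : Int) (end_min : Int) (out : List (Int × Int)) : Prop := out = iter_day_segments_py_alt start_min end_min
instance (start_min : Int) (end_min : Int) (out : List (Int × Int)) : Decidable (Spec_iter_day_segments_py start_min end_min out) := by unfold Spec_iter_day_segments_py; infer_instance

-- ===== CLAIM (what is proved, stated in full; the proofs are below) =====
def Claim_equal_iter_day_segments_py : Prop := ∀ (start_min : Int) (end_min : Int), Dom_iter_day_segments_py start_min end_min → Spec_iter_day_segments_py start_min end_min (iter_day_segments_py start_min end_min)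

-- ===== LEMMAS AND PROOFS =====

-- B's nonempty-interval body, as a standalone function of the cursor position.
def altCore (cur end_min : Int) : List (Int × Int) :=
  let first := PySem.Int.floordiv cur 1440
  let last := PySem.Int.floordiv (end_min - 1) 1440
  if first = last then [(first, end_min - cur)]
  else
    ((first, (first + 1) * 1440 - cur) ::
      (PySem.List.pyRange (first + 1) last 1).map (fun d => (d, (1440 : Int))))
    ++ [(last, end_min - last * 1440)]

theorem fd1440 (a : Int) : PySem.Int.floordiv a 1440 = a / 1440 :=
  PySem.Int.floordiv_eq_ediv_of_pos (by norm_num)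

theorem loopA_append_fuel (n : Nat) (cur e : Int) (out : List (Int × Int))
    (hn : (e - cur).toNat ≤ n) :
    iterDaySegLoopA cur e out = out ++ iterDaySegLoopA cur e [] := by
  induction n generalizing cur out with
  | zero =>
      rw [iterDaySegLoopA, dif_neg (by omega), iterDaySegLoopA, dif_neg (by omega)]
      simp
  | succ n ih =>
      by_cases h : cur < e
      · have hm : (e - min ((PySem.Int.floordiv cur 1440 + 1) * 1440) e).toNat ≤ n := by
          rw [fd1440]; omega
        conv_lhs => rw [iterDaySegLoopA]
        conv_rhs => rw [iterDaySegLoopA]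
        simp only [dif_pos h]
        rw [ih _ _ hm, ih _ ([] ++ _) hm]
        simp
      · rw [iterDaySegLoopA, dif_neg h, iterDaySegLoopA, dif_neg h]; simp

theorem loopA_append (cur e : Int) (out : List (Int × Int)) :
    iterDaySegLoopA cur e out = out ++ iterDaySegLoopA cur e [] :=
  loopA_append_fuel (e - cur).toNat cur e out (le_refl _)

theorem loopA_eq_altCore (n : Nat) (cur e : Int) (hn : (e - cur).toNat ≤ n)
    (h : cur < e) : iterDaySegLoopA cur e [] = altCore cur e := by
  induction n generalizing cur with
  | zero => omega
  | succ n ih =>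
    have hf := fd1440 cur
    have hl := fd1440 (e - 1)
    rw [iterDaySegLoopA, dif_pos h, loopA_append]
    simp only [hf]
    unfold altCore
    simp only [hf, hl]
    by_cases hfl : cur / 1440 = (e - 1) / 1440
    · -- single day: seg_end = e, loop terminates next round
      have hmin : min ((cur / 1440 + 1) * 1440) e = e := by omega
      rw [hmin, if_pos hfl, iterDaySegLoopA, dif_neg (by omega)]
      simp
    · -- first < last: seg_end = day_end, recurse from the next day boundary
      have hlt : cur / 1440 < (e - 1) / 1440 := by omega
      have hmin : min ((cur / 1440 + 1) * 1440) e = (cur / 1440 + 1) * 1440 := by omega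
      rw [hmin, if_neg hfl]
      have hde : (cur / 1440 + 1) * 1440 < e := by omega
      have hrec : iterDaySegLoopA ((cur / 1440 + 1) * 1440) e [] =
          altCore ((cur / 1440 + 1) * 1440) e := ih _ (by omega) hde
      rw [hrec]
      unfold altCore
      have hfd : (cur / 1440 + 1) * 1440 / 1440 = cur / 1440 + 1 :=
        Int.mul_ediv_cancel _ (by norm_num)
      simp only [fd1440, hl, hfd]
      by_cases h2 : cur / 1440 + 1 = (e - 1) / 1440
      · rw [if_pos h2, PySem.List.pyRange_one_eq_nil (by omega)]
        simp only [List.map_nil, List.nil_append, List.cons_append]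
        refine List.cons_eq_cons.mpr ⟨rfl, ?_⟩
        rw [← h2]
      · rw [if_neg h2,
          PySem.List.pyRange_one_cons (show cur / 1440 + 1 < (e - 1) / 1440 by omega)]
        simp only [List.map_cons, List.cons_append]
        refine List.cons_eq_cons.mpr ⟨rfl, List.cons_eq_cons.mpr ⟨?_, rfl⟩⟩
        refine Prod.ext rfl ?_
        simp only []
        ring

-- ===== VERDICT (by name: the statement is the Claim_ definition above) =====
theorem iter_day_segments_py_spec : Claim_equal_iter_day_segments_py := by
  intro s e _
  unfold Spec_iter_day_segments_py iter_day_segments_py iter_day_segments_py_alt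
  by_cases h : e ≤ s
  · rw [if_pos h, if_pos h]
  · rw [if_neg h, if_neg h]
    rw [loopA_eq_altCore (e - s).toNat s e (le_refl _) (by omega)]
    unfold altCore
    rfl
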